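-- pv_equiv track=rewrite | github.com/HewlettPackard/oneview-redfish-toolkit | oneview_redfish_toolkit/blueprints/storage.py | _get_logical_jbod
-- ===== SOURCE A (Python) =====
-- def _get_logical_jbod(drive_id_int, logical_jbod, sas_logical_jbods):
--     logical_jbods_sorted = sorted(sas_logical_jbods, key=lambda i: i["uri"])
--
--     count_drives = 0
--     for log_jbod in logical_jbods_sorted:
--         next_count = count_drives + int(log_jbod["numPhysicalDrives"])
--
--         if drive_id_int in range(count_drives + 1, next_count + 1):
--             logical_jbod = log_jbod
--             break
--
--         count_drives = next_count
--
--     return logical_jbod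
-- ===== SOURCE B (Python) =====
-- def _get_logical_jbod(drive_id_int, logical_jbod, sas_logical_jbods):
--     jbods = sorted(sas_logical_jbods, key=lambda j: j["uri"])
--     prefix = []
--     total = 0
--     for j in jbods:
--         total += int(j["numPhysicalDrives"])
--         prefix.append(total)
--     if not prefix or drive_id_int <= 0 or drive_id_int > total:
--         return logical_jbod
--     lo, hi = 0, len(prefix)
--     while lo < hi:
--         mid = (lo + hi) // 2
--         if prefix[mid] < drive_id_int:
--             lo = mid + 1
--         else:
--             hi = mid
--     return jbods[lo]
-- ===== Notes on version B (the rewrite author's own statement) =====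
-- stated objective: alternative
-- what changed: A's single linear scan with a running total and a range-membership break is replaced by building the cumulative prefix-sum list in one pass and binary-searching it for the first cumulative count >= drive_id_int, guarded by 0 < drive_id_int <= total.
import Mathlib
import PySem

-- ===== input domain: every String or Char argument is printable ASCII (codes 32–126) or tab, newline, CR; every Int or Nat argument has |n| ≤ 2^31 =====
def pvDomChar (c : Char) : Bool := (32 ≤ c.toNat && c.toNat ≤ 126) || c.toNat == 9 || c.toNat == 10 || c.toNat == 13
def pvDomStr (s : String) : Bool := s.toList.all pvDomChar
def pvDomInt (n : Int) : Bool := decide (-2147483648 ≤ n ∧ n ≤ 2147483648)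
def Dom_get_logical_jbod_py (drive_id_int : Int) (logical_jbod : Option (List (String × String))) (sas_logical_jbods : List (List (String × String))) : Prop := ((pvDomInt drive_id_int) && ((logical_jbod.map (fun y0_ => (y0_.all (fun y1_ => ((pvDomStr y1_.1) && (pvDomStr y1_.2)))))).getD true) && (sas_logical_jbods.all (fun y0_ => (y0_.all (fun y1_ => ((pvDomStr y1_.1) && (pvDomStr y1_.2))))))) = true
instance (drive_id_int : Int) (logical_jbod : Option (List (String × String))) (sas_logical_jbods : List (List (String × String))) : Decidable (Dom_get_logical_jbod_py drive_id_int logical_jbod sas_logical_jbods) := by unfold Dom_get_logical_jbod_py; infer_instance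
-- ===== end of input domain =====

-- B replaces A's linear scan (running total + range membership test with break) by a prefix-sum
-- list plus a binary search for the first cumulative count ≥ drive_id_int (objective: alternative).

-- j["numPhysicalDrives"] parsed with int(); total form, exact under Pre_ (key present, parseable)
def pvNum (j : List (String × String)) : Int :=
  ((PySem.Dict.get? (PySem.Dict.mk j) "numPhysicalDrives").bind PySem.Int.ofStr?).getD 0

-- j["uri"]; total form, exact under Pre_ (key present)
def pvUri (j : List (String × String)) : String :=
  (PySem.Dict.get? (PySem.Dict.mk j) "uri").getD ""

-- ===== PORT A =====
-- the for-loop of A: running count, break on the range test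
def pvALoop (d : Int) (lj : Option (List (String × String))) (count : Int) :
    List (List (String × String)) → Option (List (String × String))
  | [] => lj
  | j :: rest =>
    let next := count + pvNum j
    if count + 1 ≤ d ∧ d ≤ next then some j else pvALoop d lj next rest

def get_logical_jbod_py (drive_id_int : Int) (logical_jbod : Option (List (String × String))) (sas_logical_jbods : List (List (String × String))) : Option (List (String × String)) :=
  pvALoop drive_id_int logical_jbod 0 (PySem.List.sorted sas_logical_jbods (fun j => pvUri j) false)

-- ===== PORT B =====
-- the while-loop of Source B: binary search for the first prefix[i] ≥ d
def pvBsearch (p : List Int) (d : Int) (lo hi : Nat) : Nat :=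
  if _h : lo < hi then
    let mid := (lo + hi) / 2
    if p.getD mid 0 < d then pvBsearch p d (mid + 1) hi else pvBsearch p d lo mid
  else lo
termination_by hi - lo
decreasing_by all_goals omega

def get_logical_jbod_py_alt (drive_id_int : Int) (logical_jbod : Option (List (String × String))) (sas_logical_jbods : List (List (String × String))) : Option (List (String × String)) :=
  let jbods := PySem.List.sorted sas_logical_jbods (fun j => pvUri j) false
  -- the first for-loop of Source B: prefix list and running total
  let pt := jbods.foldl (fun (acc : List Int × Int) j =>
    (acc.1 ++ [acc.2 + pvNum j], acc.2 + pvNum j)) ([], 0)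
  if pt.1 = [] ∨ drive_id_int ≤ 0 ∨ pt.2 < drive_id_int then logical_jbod
  else some (PySem.List.pyGetD jbods (pvBsearch pt.1 drive_id_int 0 pt.1.length : Int) [])

-- ===== PRECONDITION & SPEC =====
-- Pre_ requires every JBOD to carry a "uri" key and an int-parseable NONNEGATIVE
-- "numPhysicalDrives": a missing key or unparseable value makes A raise (KeyError/ValueError);
-- a negative count makes A's running total non-monotone, so which JBOD its scan happens to hit
-- is an accident of A's scan order that a prefix-sum binary search does not reproduce.
def Pre_get_logical_jbod_py (drive_id_int : Int) (logical_jbod : Option (List (String × String))) (sas_logical_jbods : List (List (String × String))) : Prop :=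
  sas_logical_jbods.all (fun j =>
    (PySem.Dict.get? (PySem.Dict.mk j) "uri").isSome &&
    (match (PySem.Dict.get? (PySem.Dict.mk j) "numPhysicalDrives").bind PySem.Int.ofStr? with
     | some n => decide (0 ≤ n)
     | none => false)) = true
instance (drive_id_int : Int) (logical_jbod : Option (List (String × String))) (sas_logical_jbods : List (List (String × String))) : Decidable (Pre_get_logical_jbod_py drive_id_int logical_jbod sas_logical_jbods) := by unfold Pre_get_logical_jbod_py; infer_instance

def pvWitness_get_logical_jbod_py : Int × (Option (List (String × String))) × (List (List (String × String))) :=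
  (1, none, [[("uri", "a"), ("numPhysicalDrives", "2")]])

def Spec_get_logical_jbod_py (drive_id_int : Int) (logical_jbod : Option (List (String × String))) (sas_logical_jbods : List (List (String × String))) (out : Option (List (String × String))) : Prop := out = get_logical_jbod_py_alt drive_id_int logical_jbod sas_logical_jbods
instance (drive_id_int : Int) (logical_jbod : Option (List (String × String))) (sas_logical_jbods : List (List (String × String))) (out : Option (List (String × String))) : Decidable (Spec_get_logical_jbod_py drive_id_int logical_jbod sas_logical_jbods out) := by unfold Spec_get_logical_jbod_py; infer_instance

-- ===== CLAIM (what is proved, stated in full; the proofs are below) =====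
def Claim_equal_get_logical_jbod_py : Prop := ∀ (drive_id_int : Int) (logical_jbod : Option (List (String × String))) (sas_logical_jbods : List (List (String × String))), Dom_get_logical_jbod_py drive_id_int logical_jbod sas_logical_jbods → Pre_get_logical_jbod_py drive_id_int logical_jbod sas_logical_jbods → Spec_get_logical_jbod_py drive_id_int logical_jbod sas_logical_jbods (get_logical_jbod_py drive_id_int logical_jbod sas_logical_jbods)

-- ===== LEMMAS AND PROOFS =====

-- the prefix-sum list starting from running total c
def mkPfx (c : Int) : List (List (String × String)) → List Int
  | [] => []
  | j :: t => (c + pvNum j) :: mkPfx (c + pvNum j) t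

theorem mkPfx_length (js : List (List (String × String))) : ∀ c, (mkPfx c js).length = js.length := by
  induction js with
  | nil => intro c; rfl
  | cons j t ih => intro c; simp [mkPfx, ih]

theorem fold_eq (js : List (List (String × String))) :
    ∀ (c : Int) (acc : List Int),
    js.foldl (fun (a : List Int × Int) j => (a.1 ++ [a.2 + pvNum j], a.2 + pvNum j)) (acc, c)
      = (acc ++ mkPfx c js, c + (js.map pvNum).sum) := by
  induction js with
  | nil => intro c acc; simp [mkPfx]
  | cons j t ih => intro c acc; simp [mkPfx, ih, List.append_assoc]; ring

theorem sum_nonneg_pvNum (t : List (List (String × String))) :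
    (∀ j ∈ t, 0 ≤ pvNum j) → 0 ≤ (t.map pvNum).sum := by
  induction t with
  | nil => intro _; simp
  | cons a b ih =>
    intro h
    have := h a (by simp)
    have := ih (fun j hj => h j (by simp [hj]))
    simp; omega

theorem mkPfx_ge (js : List (List (String × String))) :
    ∀ c, (∀ j ∈ js, 0 ≤ pvNum j) → ∀ x ∈ mkPfx c js, c ≤ x := by
  induction js with
  | nil => intro c _ x hx; simp [mkPfx] at hx
  | cons j t ih =>
    intro c h x hx
    have hj : 0 ≤ pvNum j := h j (by simp)
    simp only [mkPfx, List.mem_cons] at hx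
    rcases hx with hx | hx
    · omega
    · have := ih (c + pvNum j) (fun j' hj' => h j' (by simp [hj'])) x hx; omega

theorem mkPfx_le (js : List (List (String × String))) :
    ∀ c, (∀ j ∈ js, 0 ≤ pvNum j) → ∀ x ∈ mkPfx c js, x ≤ c + (js.map pvNum).sum := by
  induction js with
  | nil => intro c _ x hx; simp [mkPfx] at hx
  | cons j t ih =>
    intro c h x hx
    have ht : ∀ j' ∈ t, 0 ≤ pvNum j' := fun j' hj' => h j' (by simp [hj'])
    have hsum : 0 ≤ (t.map pvNum).sum := sum_nonneg_pvNum t ht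
    simp only [mkPfx, List.mem_cons] at hx
    rcases hx with hx | hx
    · simp [hx]; omega
    · have := ih (c + pvNum j) ht x hx; simp at *; omega

theorem mkPfx_pairwise (js : List (List (String × String))) :
    ∀ c, (∀ j ∈ js, 0 ≤ pvNum j) → (mkPfx c js).Pairwise (· ≤ ·) := by
  induction js with
  | nil => intro c _; simp [mkPfx]
  | cons j t ih =>
    intro c h
    have ht : ∀ j' ∈ t, 0 ≤ pvNum j' := fun j' hj' => h j' (by simp [hj'])
    refine List.Pairwise.cons ?_ (ih (c + pvNum j) ht)
    intro x hx; exact mkPfx_ge t (c + pvNum j) ht x hx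

theorem mkPfx_total_mem (js : List (List (String × String))) :
    ∀ c, js ≠ [] → (c + (js.map pvNum).sum) ∈ mkPfx c js := by
  induction js with
  | nil => intro c h; exact absurd rfl h
  | cons j t ih =>
    intro c _
    cases t with
    | nil => simp [mkPfx]
    | cons a b =>
      have hmem := ih (c + pvNum j) (by simp)
      simp only [mkPfx, List.mem_cons, List.map_cons, List.sum_cons] at *
      right
      have heq : c + (pvNum j + (pvNum a + (List.map pvNum b).sum))
          = c + pvNum j + (pvNum a + (List.map pvNum b).sum) := by ring
      rw [heq]
      exact hmem

-- A's loop never matches once d ≤ count (counts only grow)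
theorem aloop_none (d : Int) (lj : Option (List (String × String))) (js : List (List (String × String))) :
    ∀ c, (∀ j ∈ js, 0 ≤ pvNum j) → d ≤ c → pvALoop d lj c js = lj := by
  induction js with
  | nil => intro c _ _; rfl
  | cons j t ih =>
    intro c h hd
    have hj : 0 ≤ pvNum j := h j (by simp)
    simp only [pvALoop]
    rw [if_neg (by omega)]
    exact ih (c + pvNum j) (fun j' hj' => h j' (by simp [hj'])) (by omega)

-- A's loop, once d > count, returns the JBOD at the first index whose prefix sum reaches d
theorem aloop_eq (d : Int) (lj : Option (List (String × String))) (js : List (List (String × String))) :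
    ∀ c, c < d →
    pvALoop d lj c js =
      match (mkPfx c js).findIdx? (fun x => decide (d ≤ x)) with
      | some i => js[i]?
      | none => lj := by
  induction js with
  | nil => intro c _; rfl
  | cons j t ih =>
    intro c hc
    simp only [pvALoop, mkPfx, List.findIdx?_cons]
    by_cases hle : d ≤ c + pvNum j
    · rw [if_pos (by omega)]; simp [hle]
    · rw [if_neg (by omega), ih (c + pvNum j) (by omega)]
      have hd : (decide (d ≤ c + pvNum j)) = false := by simpa using hle
      rw [hd]
      simp only [Bool.false_eq_true, if_false]
      cases hfi : (mkPfx (c + pvNum j) t).findIdx? (fun x => decide (d ≤ x)) with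
      | none => simp [hfi]
      | some i => simp [hfi]

-- binary search on a sorted list computes findIdx (first element ≥ d)
theorem bsearch_eq (p : List Int) (d : Int) (hp : p.Pairwise (· ≤ ·)) :
    ∀ (n lo hi : Nat), hi - lo ≤ n → lo ≤ hi → hi ≤ p.length →
    (∀ i, i < lo → i < p.length → p.getD i 0 < d) →
    (∀ i, hi ≤ i → i < p.length → d ≤ p.getD i 0) →
    pvBsearch p d lo hi = p.findIdx (fun x => decide (d ≤ x)) := by
  intro n
  induction n with
  | zero =>
    intro lo hi h1 h2 h3 hlo hhi
    rw [pvBsearch, dif_neg (by omega)]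
    have htl : p.findIdx (fun x => decide (d ≤ x)) ≤ p.length := List.findIdx_le_length
    by_cases h : p.findIdx (fun x => decide (d ≤ x)) < lo
    · exfalso
      have hlen : p.findIdx (fun x => decide (d ≤ x)) < p.length := by omega
      have hg := List.findIdx_getElem (p := fun x => decide (d ≤ x)) (xs := p) (w := hlen)
      have h2' := hlo _ h hlen
      rw [List.getD_eq_getElem p 0 hlen] at h2'
      simp at hg; omega
    · by_cases h' : hi < p.findIdx (fun x => decide (d ≤ x))
      · exfalso
        have hhl : hi < p.length := by omega
        have h2' := hhi hi (Nat.le_refl _) hhl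
        have hg := List.not_of_lt_findIdx (p := fun x => decide (d ≤ x)) (xs := p) (i := hi) h'
        rw [List.getD_eq_getElem p 0 hhl] at h2'
        simp at hg; omega
      · omega
  | succ n ihn =>
    intro lo hi h1 h2 h3 hlo hhi
    by_cases hlt : lo < hi
    · rw [pvBsearch, dif_pos hlt]
      set mid := (lo + hi) / 2 with hmid
      have hm1 : lo ≤ mid := by omega
      have hm2 : mid < hi := by omega
      by_cases hc : p.getD mid 0 < d
      · rw [if_pos hc]
        refine ihn (mid + 1) hi (by omega) (by omega) h3 ?_ hhi
        intro i hi1 hi2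
        have hmlen : mid < p.length := by omega
        have hpg : p.getD i 0 ≤ p.getD mid 0 := by
          rcases Nat.lt_or_ge i mid with h | h
          · rw [List.getD_eq_getElem p 0 hi2, List.getD_eq_getElem p 0 hmlen]
            exact List.pairwise_iff_getElem.mp hp i mid hi2 hmlen h
          · have : i = mid := by omega
            rw [this]
        omega
      · rw [if_neg hc]
        refine ihn lo mid (by omega) (by omega) (by omega) hlo ?_
        intro i hi1 hi2
        have hmlen : mid < p.length := by omega
        have hpg : p.getD mid 0 ≤ p.getD i 0 := by
          rcases Nat.lt_or_ge mid i with h | h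
          · rw [List.getD_eq_getElem p 0 hi2, List.getD_eq_getElem p 0 hmlen]
            exact List.pairwise_iff_getElem.mp hp mid i hmlen hi2 h
          · have : i = mid := by omega
            rw [this]
        omega
    · rw [pvBsearch, dif_neg hlt]
      exact (by
        have := ihn lo lo (by omega) (by omega) (by omega) hlo (by intro i h1' h2'; exact hhi i (by omega) h2')
        rw [pvBsearch, dif_neg (by omega)] at this
        have hlh : lo = hi := by omega
        exact this)

theorem pre_nonneg (sas : List (List (String × String))) (d : Int) (lj : Option (List (String × String)))
    (hpre : Pre_get_logical_jbod_py d lj sas) : ∀ j ∈ sas, 0 ≤ pvNum j := by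
  intro j hj
  unfold Pre_get_logical_jbod_py at hpre
  rw [List.all_eq_true] at hpre
  have := hpre j hj
  rw [Bool.and_eq_true] at this
  have h2 := this.2
  unfold pvNum
  cases hb : (PySem.Dict.get? (PySem.Dict.mk j) "numPhysicalDrives").bind PySem.Int.ofStr? with
  | none => rw [hb] at h2; simp at h2
  | some n => rw [hb] at h2; simp at h2 ⊢; exact h2

theorem main_equiv (d : Int) (lj : Option (List (String × String))) (sas : List (List (String × String)))
    (hpre : Pre_get_logical_jbod_py d lj sas) :
    get_logical_jbod_py d lj sas = get_logical_jbod_py_alt d lj sas := by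
  unfold get_logical_jbod_py get_logical_jbod_py_alt
  dsimp only
  set js := PySem.List.sorted sas (fun j => pvUri j) false with hjs
  have hnn : ∀ j ∈ js, 0 ≤ pvNum j := by
    intro j hj
    exact pre_nonneg sas d lj hpre j ((PySem.List.mem_sorted _ _ _ _).mp hj)
  rw [show (js.foldl (fun (a : List Int × Int) j => (a.1 ++ [a.2 + pvNum j], a.2 + pvNum j)) ([], 0))
      = ([] ++ mkPfx 0 js, 0 + (js.map pvNum).sum) from fold_eq js 0 []]
  simp only [List.nil_append, Int.zero_add]
  set total := (js.map pvNum).sum with htotal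
  by_cases hempty : mkPfx 0 js = []
  · -- js = [] as well
    have hjsnil : js = [] := by
      cases hh : js with
      | nil => rfl
      | cons a b => rw [hh] at hempty; simp [mkPfx] at hempty
    rw [if_pos (Or.inl hempty), hjsnil]; rfl
  · by_cases hd0 : d ≤ 0
    · rw [if_pos (Or.inr (Or.inl hd0))]
      exact aloop_none d lj js 0 hnn (by omega)
    · by_cases hdt : total < d
      · rw [if_pos (Or.inr (Or.inr hdt))]
        rw [aloop_eq d lj js 0 (by omega)]
        have : (mkPfx 0 js).findIdx? (fun x => decide (d ≤ x)) = none := by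
          rw [List.findIdx?_eq_none_iff]
          intro x hx
          have := mkPfx_le js 0 hnn x hx
          simp; omega
        rw [this]
      · rw [if_neg (by simp only [not_or]; exact ⟨hempty, by omega, by omega⟩)]
        rw [aloop_eq d lj js 0 (by omega)]
        -- findIdx hits: total is in the list and d ≤ total
        have hjsne : js ≠ [] := by
          intro h; rw [h] at hempty; exact hempty rfl
        have hmem : (0 + total) ∈ mkPfx 0 js := mkPfx_total_mem js 0 hjsne
        have hex : ∃ x ∈ mkPfx 0 js, decide (d ≤ x) = true := by
          refine ⟨0 + total, hmem, by simp; omega⟩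
        set t := (mkPfx 0 js).findIdx (fun x => decide (d ≤ x)) with htt
        have htlt : t < (mkPfx 0 js).length := List.findIdx_lt_length.mpr hex
        have hfi : (mkPfx 0 js).findIdx? (fun x => decide (d ≤ x)) = some t := by
          rw [List.findIdx?_eq_some_iff_findIdx_eq]
          exact ⟨htlt, rfl⟩
        rw [hfi]
        have hmatch : (match some t with
            | some i => js[i]?
            | none => lj) = js[t]? := rfl
        rw [hmatch]
        have hbs : pvBsearch (mkPfx 0 js) d 0 (mkPfx 0 js).length = t := by
          exact bsearch_eq (mkPfx 0 js) d (mkPfx_pairwise js 0 hnn)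
            ((mkPfx 0 js).length) 0 ((mkPfx 0 js).length) (by omega) (by omega) (le_refl _)
            (by intro i h _; omega) (by intro i h1 h2; omega)
        rw [hbs]
        have hlen : t < js.length := by rw [← mkPfx_length js 0]; exact htlt
        rw [PySem.List.pyGetD_natCast]
        rw [List.getElem?_eq_getElem hlen, List.getD_eq_getElem js [] hlen]

-- ===== VERDICT (by name: the statement is the Claim_ definition above) =====
theorem get_logical_jbod_py_spec : Claim_equal_get_logical_jbod_py := by
  intro d lj sas _ hpre
  unfold Spec_get_logical_jbod_py
  exact main_equiv d lj sas hpre
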